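-- pv_equiv track=rewrite | github.com/adityapatil123/hackerearth_practice | problems/maximum_inequality.py | get_binary_string_max_inequality
-- ===== SOURCE A (Python) =====
-- def get_binary_string_max_inequality(binary_string, str_len):
--     s1 = ""
--     s2 = ""
--     s = [*binary_string]
--     for i in range(str_len):
--         s1_last = s1[-1] if len(s1) > 0 else None
--         s2_last = s2[-1] if len(s2) > 0 else None
--         if s1_last != s[i]:
--             s1 += s[i]
--         elif s2_last != s[i]:
--             s2 += s[i]
--         else:
--             s1 += s[i]
--
--     return find_inequality_from_string(s1) + find_inequality_from_string(s2)
--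
-- def find_inequality_from_string(optimised_string):
--     if len(optimised_string) == 0:
--         return 0
--     count = 0
--     prev = optimised_string[0]
--     for c in optimised_string:
--         if prev != c:
--             count += 1
--         prev = c
--     return count
-- ===== SOURCE B (Python) =====
-- def get_binary_string_max_inequality(binary_string, str_len):
--     # One pass: keep only the last character of each bucket and a running
--     # count of adjacent inequalities; no string building.
--     last1 = None
--     last2 = None
--     total = 0
--     for ch in binary_string[:max(0, str_len)]:
--         if last1 != ch:
--             if last1 is not None:
--                 total += 1
--             last1 = ch
--         elif last2 != ch:
--             if last2 is not None:
--                 total += 1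
--             last2 = ch
--         # else: the char repeats bucket 1's last char; appending it changes nothing
--     return total
-- ===== Notes on version B (the rewrite author's own statement) =====
-- stated objective: faster
-- what changed: Replaces the quadratic string-building (repeated '+=' on two strings plus a second counting pass over each) by a single pass that keeps only the last character of each bucket and increments one inequality counter.
import Mathlib
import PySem

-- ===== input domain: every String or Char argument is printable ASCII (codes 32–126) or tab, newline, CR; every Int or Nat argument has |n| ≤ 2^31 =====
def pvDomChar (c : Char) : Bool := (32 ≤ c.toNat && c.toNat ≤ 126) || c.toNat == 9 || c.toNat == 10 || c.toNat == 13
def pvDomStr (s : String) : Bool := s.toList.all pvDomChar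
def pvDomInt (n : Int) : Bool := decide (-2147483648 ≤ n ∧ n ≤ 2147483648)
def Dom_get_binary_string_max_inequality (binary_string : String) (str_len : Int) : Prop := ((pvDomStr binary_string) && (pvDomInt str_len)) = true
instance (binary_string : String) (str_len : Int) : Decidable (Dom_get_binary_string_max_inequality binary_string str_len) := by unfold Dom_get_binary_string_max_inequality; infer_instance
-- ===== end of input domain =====

-- B is a single pass keeping only the last char of each bucket and one counter,
-- instead of A's quadratic string building followed by two counting passes.

-- ===== PORT A =====
-- find_inequality_from_string: count = 0; prev = s[0]; for c in s: if prev != c: count += 1; prev = c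
def find_inequality_from_string (optimised_string : List Char) : Int :=
  match optimised_string with
  | [] => 0
  | c0 :: _ =>
    (optimised_string.foldl
      (fun (st : Int × Char) c => (if st.2 ≠ c then st.1 + 1 else st.1, c)) (0, c0)).1

-- the body of A's loop over i (s1, s2 are the two built strings)
def aStep (p : List Char × List Char) (c : Char) : List Char × List Char :=
  if p.1.getLast? ≠ some c then (p.1 ++ [c], p.2)
  else if p.2.getLast? ≠ some c then (p.1, p.2 ++ [c])
  else (p.1 ++ [c], p.2)

def get_binary_string_max_inequality (binary_string : String) (str_len : Int) : Int :=
  let s := binary_string.toList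
  let p := (PySem.List.pyRange 0 str_len 1).foldl
    (fun p i => aStep p (PySem.List.pyGetD s i ' ')) ([], [])
    -- s[i]: in range for every visited i under Pre_; the ' ' default is never read there
  find_inequality_from_string p.1 + find_inequality_from_string p.2

-- ===== PORT B =====
-- the body of B's loop: (last1, last2, total)
def bStep (st : Option Char × Option Char × Int) (c : Char) : Option Char × Option Char × Int :=
  if st.1 ≠ some c then (some c, st.2.1, st.2.2 + if st.1.isSome then 1 else 0)
  else if st.2.1 ≠ some c then (st.1, some c, st.2.2 + if st.2.1.isSome then 1 else 0)
  else st

def get_binary_string_max_inequality_alt (binary_string : String) (str_len : Int) : Int :=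
  ((PySem.List.slice binary_string.toList none (some (max 0 str_len))).foldl
    bStep (none, none, 0)).2.2

-- ===== PRECONDITION & SPEC =====
-- Pre_ excludes exactly the inputs where A raises IndexError (str_len > len(binary_string)).
def Pre_get_binary_string_max_inequality (binary_string : String) (str_len : Int) : Prop :=
  str_len ≤ PySem.Str.len binary_string
instance (binary_string : String) (str_len : Int) : Decidable (Pre_get_binary_string_max_inequality binary_string str_len) := by unfold Pre_get_binary_string_max_inequality; infer_instance

def pvWitness_get_binary_string_max_inequality : String × Int := ("010011", 6)

def Spec_get_binary_string_max_inequality (binary_string : String) (str_len : Int) (out : Int) : Prop := out = get_binary_string_max_inequality_alt binary_string str_len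
instance (binary_string : String) (str_len : Int) (out : Int) : Decidable (Spec_get_binary_string_max_inequality binary_string str_len out) := by unfold Spec_get_binary_string_max_inequality; infer_instance

-- ===== CLAIM (what is proved, stated in full; the proofs are below) =====
def Claim_equal_get_binary_string_max_inequality : Prop := ∀ (binary_string : String) (str_len : Int), Dom_get_binary_string_max_inequality binary_string str_len → Pre_get_binary_string_max_inequality binary_string str_len → Spec_get_binary_string_max_inequality binary_string str_len (get_binary_string_max_inequality binary_string str_len)


-- ===== LEMMAS AND PROOFS =====

-- the second component of find_inequality's fold is the last char seen (or the seed)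
lemma fi_fold_snd (xs : List Char) (t : Int) (p : Char) :
    (xs.foldl (fun (st : Int × Char) c => (if st.2 ≠ c then st.1 + 1 else st.1, c)) (t, p)).2
      = xs.getLast?.getD p := by
  induction xs generalizing t p with
  | nil => simp
  | cons x xs ih =>
    rw [List.foldl_cons, ih]
    cases xs with
    | nil => simp
    | cons y ys =>
      obtain ⟨z, hz⟩ := Option.isSome_iff_exists.mp (List.getLast?_isSome.mpr
        (by simp : (y :: ys : List Char) ≠ []))
      simp [hz]

lemma fi_nil : find_inequality_from_string [] = 0 := rfl

-- appending one char adds 1 iff the string was nonempty and ended in a different char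
lemma fi_concat (xs : List Char) (c : Char) :
    find_inequality_from_string (xs ++ [c])
      = find_inequality_from_string xs
          + (if xs.getLast? ≠ some c ∧ xs.getLast?.isSome then 1 else 0) := by
  cases xs with
  | nil => simp [find_inequality_from_string]
  | cons x xs' =>
    have hsnd := fi_fold_snd (x :: xs') 0 x
    have hlast : (x :: xs').getLast? = some ((x :: xs').getLast?.getD x) := by
      obtain ⟨z, hz⟩ := Option.isSome_iff_exists.mp (List.getLast?_isSome.mpr
        (by simp : (x :: xs' : List Char) ≠ []))
      simp [hz]
    simp only [find_inequality_from_string, List.cons_append]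
    rw [show ((x :: (xs' ++ [c])).foldl
          (fun (st : Int × Char) c => (if st.2 ≠ c then st.1 + 1 else st.1, c)) (0, x))
        = ([c].foldl (fun (st : Int × Char) c => (if st.2 ≠ c then st.1 + 1 else st.1, c))
            ((x :: xs').foldl
              (fun (st : Int × Char) c => (if st.2 ≠ c then st.1 + 1 else st.1, c)) (0, x)))
        from by rw [← List.foldl_append]; rfl]
    rw [List.foldl_cons, List.foldl_nil, hsnd, hlast]
    clear hsnd hlast
    split_ifs with hA hB hB <;> simp_all

-- main invariant: B's state is (last of s1, last of s2, ineq s1 + ineq s2)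
lemma key (l : List Char) : ∀ (s1 s2 : List Char),
    l.foldl bStep (s1.getLast?, s2.getLast?,
        find_inequality_from_string s1 + find_inequality_from_string s2)
      = ((l.foldl aStep (s1, s2)).1.getLast?, (l.foldl aStep (s1, s2)).2.getLast?,
         find_inequality_from_string (l.foldl aStep (s1, s2)).1
           + find_inequality_from_string (l.foldl aStep (s1, s2)).2) := by
  induction l with
  | nil => intro s1 s2; simp
  | cons c l ih =>
    intro s1 s2
    rw [List.foldl_cons, List.foldl_cons]
    by_cases h1 : s1.getLast? = some c
    · by_cases h2 : s2.getLast? = some c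
      · -- else branch of A: append c to s1, which ends in c already; B leaves its state alone
        have ha : aStep (s1, s2) c = (s1 ++ [c], s2) := by simp [aStep, h1, h2]
        have hb : bStep (s1.getLast?, s2.getLast?,
            find_inequality_from_string s1 + find_inequality_from_string s2) c
            = (s1.getLast?, s2.getLast?,
               find_inequality_from_string s1 + find_inequality_from_string s2) := by
          simp [bStep, h1, h2]
        have h3 : (s1 ++ [c]).getLast? = s1.getLast? := by simp [h1]
        have h4 : find_inequality_from_string (s1 ++ [c]) = find_inequality_from_string s1 := by
          rw [fi_concat]; simp [h1]
        rw [hb, ha, ← h3, ← h4]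
        exact ih (s1 ++ [c]) s2
      · -- A appends to s2; B bumps its counter iff s2 was nonempty
        have ha : aStep (s1, s2) c = (s1, s2 ++ [c]) := by simp [aStep, h1, h2]
        have hb : bStep (s1.getLast?, s2.getLast?,
            find_inequality_from_string s1 + find_inequality_from_string s2) c
            = (s1.getLast?, some c,
               find_inequality_from_string s1 + find_inequality_from_string s2
                 + if s2.getLast?.isSome then 1 else 0) := by
          simp [bStep, h1, h2]
        have h3 : (s2 ++ [c]).getLast? = some c := by simp
        have h4 : find_inequality_from_string (s2 ++ [c])
            = find_inequality_from_string s2 + if s2.getLast?.isSome then 1 else 0 := by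
          rw [fi_concat]; simp [h2]
        have := ih s1 (s2 ++ [c])
        rw [h3, h4] at this
        rw [hb, ha, add_assoc]
        exact this
    · -- A appends to s1; B bumps its counter iff s1 was nonempty
      have ha : aStep (s1, s2) c = (s1 ++ [c], s2) := by simp [aStep, h1]
      have hb : bStep (s1.getLast?, s2.getLast?,
          find_inequality_from_string s1 + find_inequality_from_string s2) c
          = (some c, s2.getLast?,
             find_inequality_from_string s1 + find_inequality_from_string s2
               + if s1.getLast?.isSome then 1 else 0) := by
        simp [bStep, h1]
      have h3 : (s1 ++ [c]).getLast? = some c := by simp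
      have h4 : find_inequality_from_string (s1 ++ [c])
          = find_inequality_from_string s1 + if s1.getLast?.isSome then 1 else 0 := by
        rw [fi_concat]; simp [h1]
      have := ih (s1 ++ [c]) s2
      rw [h3, h4] at this
      have harr : find_inequality_from_string s1 + find_inequality_from_string s2
            + (if s1.getLast?.isSome then 1 else 0)
          = find_inequality_from_string s1 + (if s1.getLast?.isSome then 1 else 0)
            + find_inequality_from_string s2 := by ring
      rw [hb, ha, harr]
      exact this

-- A's index loop over range(str_len) is a fold over the first str_len chars
lemma fold_range_take {α : Type} (s : List Char) (f : α → Char → α) (init : α) :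
    ∀ (k : Nat), k ≤ s.length →
    (PySem.List.pyRange 0 (k : Int) 1).foldl (fun p i => f p (PySem.List.pyGetD s i ' ')) init
      = (s.take k).foldl f init := by
  intro k
  induction k with
  | zero => intro _; simp [PySem.List.pyRange_one_eq_nil]
  | succ k ih =>
    intro hk
    have hk' : k ≤ s.length := Nat.le_of_succ_le hk
    have hlt : k < s.length := hk
    have hgc : PySem.List.pyGetD s (k : Int) ' ' = s[k] := by
      rw [PySem.List.pyGetD_natCast]; simp [hlt]
    have htake : s.take (k + 1) = s.take k ++ [s[k]] := by
      rw [List.take_add_one, List.getElem?_eq_getElem hlt]; rfl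
    rw [show ((k + 1 : Nat) : Int) = (k : Int) + 1 by push_cast; ring,
        PySem.List.pyRange_one_succ_right (by positivity), List.foldl_append, ih hk',
        htake, List.foldl_append, List.foldl_cons, List.foldl_nil, List.foldl_cons,
        List.foldl_nil, hgc]

-- ===== VERDICT (by name: the statement is the Claim_ definition above) =====
theorem get_binary_string_max_inequality_spec : Claim_equal_get_binary_string_max_inequality := by
  intro bs n _ hpre
  unfold Pre_get_binary_string_max_inequality at hpre
  simp only [PySem.Str.len_eq] at hpre
  simp only [Spec_get_binary_string_max_inequality, get_binary_string_max_inequality,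
    get_binary_string_max_inequality_alt]
  have h0 : max 0 n = ((max 0 n).toNat : Int) := by omega
  have hle : (max 0 n).toNat ≤ bs.toList.length := by omega
  have hslice : PySem.List.slice bs.toList none (some (max 0 n))
      = bs.toList.take (max 0 n).toNat := by
    rw [h0, PySem.List.slice_to_natCast]
    simp
  have hmax : PySem.List.pyRange 0 n 1 = PySem.List.pyRange 0 (max 0 n) 1 := by
    by_cases h : (0 : Int) ≤ n
    · rw [max_eq_right h]
    · rw [PySem.List.pyRange_one_eq_nil (by omega), PySem.List.pyRange_one_eq_nil (by omega)]
  have hfold : (PySem.List.pyRange 0 (max 0 n) 1).foldl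
      (fun p i => aStep p (PySem.List.pyGetD bs.toList i ' ')) ([], [])
      = (bs.toList.take (max 0 n).toNat).foldl aStep ([], []) := by
    have h := fold_range_take bs.toList aStep ([], []) (max 0 n).toNat hle
    rw [← h0] at h
    exact h
  rw [hslice, hmax, hfold]
  have hk := key (bs.toList.take (max 0 n).toNat) ([] : List Char) ([] : List Char)
  simp only [List.getLast?_nil, fi_nil, add_zero] at hk
  rw [hk]
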